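-- pv_equiv track=rewrite | github.com/nitin35byte/new_prython_practise_repo | Prepbite/Boolean answer.py | max_completed_cow
-- ===== SOURCE A (Python) =====
-- def max_completed_cow(rows):
--     max_completed = -1
--     max_row_index =-1
--
--     for i  ,row in enumerate(rows):
--         completed_count=sum(row)
--         if completed_count >max_completed:
--             max_completed=completed_count
--             max_row_index=i+1
--
--     return max_row_index if max_completed>0 else -1
-- ===== SOURCE B (Python) =====
-- def max_completed_cow(rows):
--     ranked = sorted(((sum(row), i) for i, row in enumerate(rows)), key=lambda p: -p[0])
--     if not ranked or ranked[0][0] <= 0: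
--         return -1
--     return ranked[0][1] + 1
-- ===== Notes on version B (the rewrite author's own statement) =====
-- stated objective: alternative
-- what changed: A's single interleaved argmax scan tracking (max_sum, best_index) is replaced by a sort-based selection: build (sum, index) pairs, stably sort them by descending sum, and read the answer off the head of the sorted list (stability gives the first-occurrence tie-break), applying the >0 sentinel at the end.
import Mathlib
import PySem

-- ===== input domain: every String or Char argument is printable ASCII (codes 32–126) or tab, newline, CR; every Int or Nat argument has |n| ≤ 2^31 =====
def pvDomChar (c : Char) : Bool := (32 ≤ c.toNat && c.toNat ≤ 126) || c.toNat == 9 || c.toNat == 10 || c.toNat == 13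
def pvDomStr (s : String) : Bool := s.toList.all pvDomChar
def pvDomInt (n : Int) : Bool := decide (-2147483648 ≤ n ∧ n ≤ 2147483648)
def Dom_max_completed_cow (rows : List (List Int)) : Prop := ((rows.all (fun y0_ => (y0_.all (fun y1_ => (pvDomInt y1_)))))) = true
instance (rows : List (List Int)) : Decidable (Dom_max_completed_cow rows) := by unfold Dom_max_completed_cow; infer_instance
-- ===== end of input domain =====

-- B replaces A's interleaved argmax scan by sort-based selection (stable sort of (sum, index) pairs by descending sum, then read the head); objective: alternative, same result.

-- ===== PORT A =====
-- single pass over enumerate(rows), tracking (max_completed, max_row_index)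
def max_completed_cow (rows : List (List Int)) : Int :=
  let st := (PySem.List.enumerate rows 0).foldl
    (fun (acc : Int × Int) p =>
      let completed_count := p.2.foldl (· + ·) 0
      if completed_count > acc.1 then (completed_count, p.1 + 1) else acc)
    (-1, -1)
  if st.1 > 0 then st.2 else -1

-- ===== PORT B =====
-- build (sum, index) pairs, stably sort descending by sum, answer from the head
def max_completed_cow_alt (rows : List (List Int)) : Int :=
  let ranked := PySem.List.sorted
    ((PySem.List.enumerate rows 0).map (fun p => (p.2.foldl (· + ·) 0, p.1)))
    (fun q => -q.1) false
  match ranked with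
  | [] => -1
  | h :: _ => if h.1 ≤ 0 then -1 else h.2 + 1

-- ===== PRECONDITION & SPEC =====
def Spec_max_completed_cow (rows : List (List Int)) (out : Int) : Prop := out = max_completed_cow_alt rows
instance (rows : List (List Int)) (out : Int) : Decidable (Spec_max_completed_cow rows out) := by unfold Spec_max_completed_cow; infer_instance

-- ===== CLAIM (what is proved, stated in full; the proofs are below) =====
def Claim_equal_max_completed_cow : Prop := ∀ (rows : List (List Int)), Dom_max_completed_cow rows → Spec_max_completed_cow rows (max_completed_cow rows)

-- ===== LEMMAS AND PROOFS =====

-- the running "first row with strictly larger sum" selection both programs reduce to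
def selH (h : Int × Int) (k : Int) : List (List Int) → Int × Int
  | [] => h
  | r :: rs => selH (if r.foldl (· + ·) 0 > h.1 then (r.foldl (· + ·) 0, k) else h) (k + 1) rs

-- A's fold over enumerate equals selH (A stores the 1-based index)
theorem foldA_selH (rows : List (List Int)) : ∀ (k c i : Int),
    (PySem.List.enumerate rows k).foldl
      (fun (acc : Int × Int) p =>
        let completed_count := p.2.foldl (· + ·) 0
        if completed_count > acc.1 then (completed_count, p.1 + 1) else acc)
      (c, i + 1)
    = ((selH (c, i) k rows).1, (selH (c, i) k rows).2 + 1) := by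
  induction rows with
  | nil => intro k c i; simp [PySem.List.enumerate_nil, selH]
  | cons r rs ih =>
    intro k c i
    rw [PySem.List.enumerate_cons]
    simp only [List.foldl_cons, selH]
    by_cases h : r.foldl (· + ·) 0 > c
    · simp only [h, if_pos]
      exact ih (k + 1) (r.foldl (· + ·) 0) k
    · simp only [h, if_neg, not_false_iff]
      exact ih (k + 1) c i

-- head of an insertion into a nonempty list
theorem insertBy_head {α : Type} (bef : α → α → Bool) (x h : α) (t : List α) :
    ∃ t', PySem.List.insertBy bef x (h :: t) = (if bef x h then x else h) :: t' := by
  cases hb : bef x h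
  · refine ⟨PySem.List.insertBy bef x t, ?_⟩
    simp [PySem.List.insertBy, hb]
  · refine ⟨h :: t, ?_⟩
    simp [PySem.List.insertBy, hb]

-- B's insertion-sort fold, started on a nonempty accumulator, keeps selH at the head
theorem foldIns_head (rows : List (List Int)) : ∀ (k : Int) (h : Int × Int) (t : List (Int × Int)),
    ∃ t', (PySem.List.enumerate rows k).foldl
        (fun acc p => PySem.List.insertBy (fun a b => decide ((-(a.1) : Int) < -(b.1)))
          (p.2.foldl (· + ·) 0, p.1) acc)
        (h :: t)
      = selH h k rows :: t' := by
  induction rows with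
  | nil => intro k h t; exact ⟨t, by simp [PySem.List.enumerate_nil, selH]⟩
  | cons r rs ih =>
    intro k h t
    rw [PySem.List.enumerate_cons]
    simp only [List.foldl_cons]
    obtain ⟨t'', ht''⟩ := insertBy_head (fun a b => decide ((-(a.1) : Int) < -(b.1)))
      (r.foldl (· + ·) 0, k) h t
    rw [ht'']
    have hcond : (decide ((-(r.foldl (· + ·) 0) : Int) < -(h.1)) = true) ↔ r.foldl (· + ·) 0 > h.1 := by
      simp only [decide_eq_true_eq]; omega
    simp only [selH]
    by_cases hc : r.foldl (· + ·) 0 > h.1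
    · rw [if_pos (hcond.mpr hc), if_pos hc]; exact ih (k + 1) _ t''
    · rw [if_neg (fun hh => hc (hcond.mp hh)), if_neg hc]; exact ih (k + 1) h t''

-- while both accumulators are ≤ -1 (A's fixed at -1), the selections agree on ">0" and, when it holds, agree outright
theorem selH_low (rows : List (List Int)) : ∀ (k i c' i' : Int), c' ≤ -1 →
    ((selH (-1, i) k rows).1 > 0 ↔ (selH (c', i') k rows).1 > 0) ∧
    ((selH (c', i') k rows).1 > 0 → selH (-1, i) k rows = selH (c', i') k rows) := by
  induction rows with
  | nil =>
    intro k i c' i' hc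
    simp only [selH]
    refine ⟨by simp; omega, fun hgt => absurd hgt (by simp; omega)⟩
  | cons r rs ih =>
    intro k i c' i' hc
    set s := r.foldl (· + ·) 0 with hs
    simp only [selH, ← hs]
    by_cases h1 : s > -1
    · have h2 : s > c' := by omega
      simp only [h1, h2, if_pos]
      exact ⟨trivial, fun _ => trivial⟩
    · simp only [h1, if_neg, not_false_iff]
      by_cases h2 : s > c'
      · simp only [h2, if_pos]
        exact ih (k + 1) i s k (by omega)
      · simp only [h2, if_neg, not_false_iff]
        exact ih (k + 1) i c' i' hc

-- ===== VERDICT (by name: the statement is the Claim_ definition above) =====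
theorem max_completed_cow_spec : Claim_equal_max_completed_cow := by
  intro rows _
  unfold Spec_max_completed_cow max_completed_cow max_completed_cow_alt
  cases rows with
  | nil => simp [PySem.List.enumerate_nil, PySem.List.sorted]
  | cons r rs =>
    set s0 := r.foldl (· + ·) 0 with hs0
    -- A's side via selH, with init (-1, -1) = (-1, (-2) + 1)
    have hA : ((PySem.List.enumerate (r :: rs) 0).foldl
        (fun (acc : Int × Int) p =>
          let completed_count := p.2.foldl (· + ·) 0
          if completed_count > acc.1 then (completed_count, p.1 + 1) else acc)
        (-1, -1))
      = ((selH (-1, -2) 0 (r :: rs)).1, (selH (-1, -2) 0 (r :: rs)).2 + 1) := by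
      have := foldA_selH (r :: rs) 0 (-1) (-2)
      norm_num at this ⊢
      exact this
    -- B's side: sorted = selH (s0, 0) 1 rs :: t'
    obtain ⟨t', ht'⟩ := foldIns_head rs 1 (s0, 0) []
    have hB : PySem.List.sorted
        ((PySem.List.enumerate (r :: rs) 0).map (fun p => (p.2.foldl (· + ·) 0, p.1)))
        (fun q => -q.1) false = selH (s0, 0) 1 rs :: t' := by
      rw [PySem.List.sorted_eq_foldl_insertBy, List.foldl_map, PySem.List.enumerate_cons,
        List.foldl_cons]
      have h0 : PySem.List.insertBy (fun a b => decide ((-(a.1) : Int) < -(b.1)))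
          (r.foldl (· + ·) 0, (0 : Int)) [] = [(s0, 0)] := by
        simp [PySem.List.insertBy, hs0]
      simpa [h0] using ht'
    simp only [hA, hB, selH, ← hs0, zero_add]
    by_cases h1 : s0 > -1
    · simp only [h1, if_pos]
      set h := selH (s0, 0) 1 rs with hh
      by_cases h2 : h.1 ≤ 0
      · rw [if_pos h2, if_neg (by omega : ¬ h.1 > 0)]
      · rw [if_neg h2, if_pos (by omega : h.1 > 0)]
    · simp only [h1, if_neg, not_false_iff]
      obtain ⟨hiff, heq⟩ := selH_low rs 1 (-2) s0 0 (by omega)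
      by_cases h2 : (selH (s0, 0) 1 rs).1 ≤ 0
      · have hna : ¬ (selH (-1, -2) 1 rs).1 > 0 := by rw [hiff]; omega
        rw [if_pos h2, if_neg hna]
      · have hp : (selH (s0, 0) 1 rs).1 > 0 := by omega
        rw [if_neg h2, heq hp, if_pos hp]
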